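-- pv_equiv track=rewrite | github.com/roginandd/api | config/prompt_config.py | build_refinement_context
-- ===== SOURCE A (Python) =====
-- from typing import Dict, Optional, List
--
-- def build_refinement_context(previous_parameters: Dict,
--                             new_parameters: Dict,
--                             chat_history: List[str]) -> str:
--     """
--     Build context for refinement prompts when user wants to adjust staging
--
--     Args:
--         previous_parameters: Previous staging parameters
--         new_parameters: Updated staging parameters
--         chat_history: Recent chat history
--
--     Returns:
--         Context string for refinement
--     """
--     changes = []
--
--     if previous_parameters.get('style') != new_parameters.get('style'):
--         changes.append(f"Style changed from {previous_parameters.get('style')} to {new_parameters.get('style')}")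
--     if previous_parameters.get('furniture_theme') != new_parameters.get('furniture_theme'):
--         changes.append(f"Furniture theme changed from {previous_parameters.get('furniture_theme')} to {new_parameters.get('furniture_theme')}")
--     if previous_parameters.get('color_scheme') != new_parameters.get('color_scheme'):
--         changes.append(f"Color scheme changed from {previous_parameters.get('color_scheme')} to {new_parameters.get('color_scheme')}")
--
--     context = "REFINEMENT CONTEXT:\n"
--     if changes:
--         context += "Changes made:\n" + "\n".join(f"- {change}" for change in changes) + "\n"
--
--     if chat_history:
--         context += f"\nRecent conversation history ({len(chat_history)} messages):\n"
--         for i, msg in enumerate(chat_history[-3:], 1):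
--             context += f"{i}. {msg}\n"
--
--     return context
-- ===== SOURCE B (Python) =====
-- from typing import Dict, List
--
-- _FIELDS = (('style', 'Style'),
--            ('furniture_theme', 'Furniture theme'),
--            ('color_scheme', 'Color scheme'))
--
-- def _differs(prev, new, key):
--     return prev.get(key) != new.get(key)
--
-- def _change_lines(prev, new, fields):
--     # Recursively emit each "- <label> changed ...\n" line directly; no list is built.
--     if not fields:
--         return ""
--     (key, label), rest = fields[0], fields[1:]
--     line = (f"- {label} changed from {prev.get(key)} to {new.get(key)}\n"
--             if _differs(prev, new, key) else "")
--     return line + _change_lines(prev, new, rest)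
--
-- def _history_lines(msgs, i):
--     if not msgs:
--         return ""
--     return f"{i}. {msgs[0]}\n" + _history_lines(msgs[1:], i + 1)
--
-- def build_refinement_context(previous_parameters: Dict,
--                              new_parameters: Dict,
--                              chat_history: List[str]) -> str:
--     changes_section = (
--         "Changes made:\n" + _change_lines(previous_parameters, new_parameters, _FIELDS)
--         if any(_differs(previous_parameters, new_parameters, k) for k, _ in _FIELDS)
--         else "")
--     history_section = (
--         f"\nRecent conversation history ({len(chat_history)} messages):\n"
--         + _history_lines(chat_history[-3:], 1)
--         if chat_history else "")
--     return "REFINEMENT CONTEXT:\n" + changes_section + history_section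
-- ===== Notes on version B (the rewrite author's own statement) =====
-- stated objective: alternative
-- what changed: B never materialises A's changes list: it decides the header with an any() test over a field table, recursively emits each '- ... changed ...' line directly (so the join-with-'\n'-then-prefix pass disappears), and numbers the history via a recursive helper carrying the index instead of enumerate plus in-place concatenation; the result is three independent sections concatenated once.
import Mathlib
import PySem

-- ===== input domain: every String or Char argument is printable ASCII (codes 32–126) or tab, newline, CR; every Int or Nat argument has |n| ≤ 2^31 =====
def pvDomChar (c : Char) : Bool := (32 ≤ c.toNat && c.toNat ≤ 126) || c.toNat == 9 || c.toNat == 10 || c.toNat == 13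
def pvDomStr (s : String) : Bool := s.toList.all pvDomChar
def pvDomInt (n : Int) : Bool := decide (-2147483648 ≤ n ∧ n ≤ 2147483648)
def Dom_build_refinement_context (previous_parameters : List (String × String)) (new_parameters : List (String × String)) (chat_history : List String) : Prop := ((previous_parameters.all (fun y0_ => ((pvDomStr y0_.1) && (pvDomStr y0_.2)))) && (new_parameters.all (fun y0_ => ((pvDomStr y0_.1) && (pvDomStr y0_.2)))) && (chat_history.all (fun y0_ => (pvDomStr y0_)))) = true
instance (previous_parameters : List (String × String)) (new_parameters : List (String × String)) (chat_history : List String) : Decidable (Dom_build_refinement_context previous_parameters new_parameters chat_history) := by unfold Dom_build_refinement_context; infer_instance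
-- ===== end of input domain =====

-- B drops A's intermediate changes list: an any() test decides the header, recursive helpers emit
-- the dash lines and the numbered history lines directly, and three sections are concatenated once.
-- ===== PORT A =====
-- Shared by both ports only where both Pythons call the same built-in:
-- dict.get(k) (first-match association-list lookup) and f-string rendering of an Optional value.
def pvGet (d : List (String × String)) (k : String) : Option String :=
  PySem.Dict.get? (PySem.Dict.mk d) k

def pvFmt : Option String → String
  | none => "None"
  | some s => s

def build_refinement_context (previous_parameters : List (String × String)) (new_parameters : List (String × String)) (chat_history : List String) : String :=
  let changes : List String := []
  let changes :=
    if pvGet previous_parameters "style" ≠ pvGet new_parameters "style" then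
      changes ++ ["Style changed from " ++ pvFmt (pvGet previous_parameters "style") ++ " to " ++ pvFmt (pvGet new_parameters "style")]
    else changes
  let changes :=
    if pvGet previous_parameters "furniture_theme" ≠ pvGet new_parameters "furniture_theme" then
      changes ++ ["Furniture theme changed from " ++ pvFmt (pvGet previous_parameters "furniture_theme") ++ " to " ++ pvFmt (pvGet new_parameters "furniture_theme")]
    else changes
  let changes :=
    if pvGet previous_parameters "color_scheme" ≠ pvGet new_parameters "color_scheme" then
      changes ++ ["Color scheme changed from " ++ pvFmt (pvGet previous_parameters "color_scheme") ++ " to " ++ pvFmt (pvGet new_parameters "color_scheme")]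
    else changes
  let context := "REFINEMENT CONTEXT:\n"
  let context :=
    if changes ≠ [] then
      context ++ ("Changes made:\n" ++ PySem.Str.join "\n" (changes.map (fun change => "- " ++ change)) ++ "\n")
    else context
  let context :=
    if chat_history ≠ [] then
      let context := context ++ ("\nRecent conversation history (" ++ PySem.Int.toStr (chat_history.length : Int) ++ " messages):\n")
      (PySem.List.enumerate (PySem.List.slice chat_history (some (-3)) none) 1).foldl
        (fun c im => c ++ (PySem.Int.toStr im.1 ++ ". " ++ im.2 ++ "\n")) context
    else context
  context

-- ===== PORT B =====
def pvFields : List (String × String) :=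
  [("style", "Style"), ("furniture_theme", "Furniture theme"), ("color_scheme", "Color scheme")]

def pvDiffers (pp np : List (String × String)) (k : String) : Bool :=
  decide (pvGet pp k ≠ pvGet np k)

def pvChangeLines (pp np : List (String × String)) : List (String × String) → String
  | [] => ""
  | (k, l) :: rest =>
      (if pvDiffers pp np k then
        "- " ++ l ++ " changed from " ++ pvFmt (pvGet pp k) ++ " to " ++ pvFmt (pvGet np k) ++ "\n"
      else "") ++ pvChangeLines pp np rest

def pvHistoryLines : List String → Int → String
  | [], _ => ""
  | m :: rest, i => PySem.Int.toStr i ++ ". " ++ m ++ "\n" ++ pvHistoryLines rest (i + 1)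

def build_refinement_context_alt (previous_parameters : List (String × String)) (new_parameters : List (String × String)) (chat_history : List String) : String :=
  let changes_section :=
    if pvFields.any (fun kl => pvDiffers previous_parameters new_parameters kl.1) then
      "Changes made:\n" ++ pvChangeLines previous_parameters new_parameters pvFields
    else ""
  let history_section :=
    if chat_history ≠ [] then
      "\nRecent conversation history (" ++ PySem.Int.toStr (chat_history.length : Int) ++ " messages):\n"
        ++ pvHistoryLines (PySem.List.slice chat_history (some (-3)) none) 1
    else ""
  "REFINEMENT CONTEXT:\n" ++ changes_section ++ history_section

-- ===== PRECONDITION & SPEC =====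
def Spec_build_refinement_context (previous_parameters : List (String × String)) (new_parameters : List (String × String)) (chat_history : List String) (out : String) : Prop := out = build_refinement_context_alt previous_parameters new_parameters chat_history
instance (previous_parameters : List (String × String)) (new_parameters : List (String × String)) (chat_history : List String) (out : String) : Decidable (Spec_build_refinement_context previous_parameters new_parameters chat_history out) := by unfold Spec_build_refinement_context; infer_instance

-- ===== CLAIM =====
def Claim_equal_build_refinement_context : Prop := ∀ (previous_parameters : List (String × String)) (new_parameters : List (String × String)) (chat_history : List String), Dom_build_refinement_context previous_parameters new_parameters chat_history → Spec_build_refinement_context previous_parameters new_parameters chat_history (build_refinement_context previous_parameters new_parameters chat_history)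

-- ===== LEMMAS AND PROOFS =====
theorem pv_join_singleton (sep a : String) : PySem.Str.join sep [a] = a := by
  simp [PySem.Str.join, PySem.Chars.join_singleton]

theorem pv_join_cons_cons (sep a b : String) (r : List String) :
    PySem.Str.join sep (a :: b :: r) = a ++ sep ++ PySem.Str.join sep (b :: r) := by
  simp [PySem.Str.join, PySem.Chars.join_cons_cons, String.ofList_append, String.append_assoc]

-- A's enumerate-foldl over the history equals B's recursive numbered lines appended to the accumulator.
theorem pv_hist (xs : List String) (i : Int) (c0 : String) :
    (PySem.List.enumerate xs i).foldl
      (fun c im => c ++ (PySem.Int.toStr im.1 ++ (". " ++ (im.2 ++ "\n")))) c0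
      = c0 ++ pvHistoryLines xs i := by
  induction xs generalizing i c0 with
  | nil => simp [PySem.List.enumerate_nil, pvHistoryLines]
  | cons m r ih =>
      rw [PySem.List.enumerate_cons, List.foldl_cons, ih, pvHistoryLines]
      simp [String.append_assoc]

-- re-associate a dash prefix onto the following literal (simp pre-merges B's adjacent literals).
theorem pv_dash_style (x : String) :
    "- " ++ ("Style changed from " ++ x) = "- Style changed from " ++ x := by
  rw [← String.append_assoc]; rfl
theorem pv_dash_furn (x : String) :
    "- " ++ ("Furniture theme changed from " ++ x) = "- Furniture theme changed from " ++ x := by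
  rw [← String.append_assoc]; rfl
theorem pv_dash_color (x : String) :
    "- " ++ ("Color scheme changed from " ++ x) = "- Color scheme changed from " ++ x := by
  rw [← String.append_assoc]; rfl

-- ===== VERDICT =====
theorem build_refinement_context_spec : Claim_equal_build_refinement_context := by
  intro pp np ch _
  unfold Spec_build_refinement_context build_refinement_context build_refinement_context_alt
  simp only [pvFields, List.any_cons, List.any_nil, pvChangeLines, pvDiffers, Bool.or_false]
  by_cases h1 : pvGet pp "style" = pvGet np "style" <;>
  by_cases h2 : pvGet pp "furniture_theme" = pvGet np "furniture_theme" <;>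
  by_cases h3 : pvGet pp "color_scheme" = pvGet np "color_scheme" <;>
  by_cases h4 : ch = [] <;>
  simp [h1, h2, h3, h4, pv_join_singleton, pv_join_cons_cons, pv_hist,
    pv_dash_style, pv_dash_furn, pv_dash_color, String.append_assoc]
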